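-- pv_equiv track=rewrite | github.com/vaibhav-jain-dev/learning-algo | problems/200-must-solve/arrays/10-monotonic-array/similar/03-can-become-monotonic/python_code.py | can_become_non_decreasing
-- ===== SOURCE A (Python) =====
-- from typing import List
--
-- def can_become_non_decreasing(array: List[int]) -> bool:
--     """Check if array can become non-decreasing with one change."""
--     if len(array) <= 2:
--         return True
--
--     violations = 0
--     violation_idx = -1
--
--     for i in range(len(array) - 1):
--         if array[i] > array[i + 1]:
--             violations += 1
--             violation_idx = i
--             if violations > 1:
--                 return False
--
--     if violations == 0:
--         return True
--
--     # One violation at index i: arr[i] > arr[i+1]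
--     # Option A: Change arr[i] to something <= arr[i+1]
--     #           Works if i == 0 OR arr[i-1] <= arr[i+1]
--     # Option B: Change arr[i+1] to something >= arr[i]
--     #           Works if i+1 == n-1 OR arr[i] <= arr[i+2]
--
--     i = violation_idx
--
--     # Option A: change arr[i]
--     option_a = (i == 0) or (array[i - 1] <= array[i + 1])
--
--     # Option B: change arr[i+1]
--     option_b = (i + 1 == len(array) - 1) or (array[i] <= array[i + 2])
--
--     return option_a or option_b
-- ===== SOURCE B (Python) =====
-- def can_become_non_decreasing(array):
--     """Single-pass greedy repair: on the first violation fix it in the running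
--     state (lower the left element if possible, else raise the right one) and
--     keep scanning; a second violation fails immediately."""
--     if not array:
--         return True
--     pp = None          # effective element two positions back
--     p = array[0]       # effective previous element
--     used = False
--     for x in array[1:]:
--         if p <= x:
--             pp, p = p, x
--         elif used:
--             return False
--         elif pp is None or pp <= x:
--             pp, p, used = p, x, True   # lower the left element to x
--         else:
--             pp, p, used = p, p, True   # raise the right element to p
--     return True
-- ===== Notes on version B (the rewrite author's own statement) =====
-- stated objective: alternative
-- what changed: Replaces A's count-every-violation pass plus a post-hoc bridge check on global array indices by the canonical single-pass greedy repair that carries only the two effective previous elements, fixes the first violation in that running state, and fails immediately on a second violation.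
import Mathlib
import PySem

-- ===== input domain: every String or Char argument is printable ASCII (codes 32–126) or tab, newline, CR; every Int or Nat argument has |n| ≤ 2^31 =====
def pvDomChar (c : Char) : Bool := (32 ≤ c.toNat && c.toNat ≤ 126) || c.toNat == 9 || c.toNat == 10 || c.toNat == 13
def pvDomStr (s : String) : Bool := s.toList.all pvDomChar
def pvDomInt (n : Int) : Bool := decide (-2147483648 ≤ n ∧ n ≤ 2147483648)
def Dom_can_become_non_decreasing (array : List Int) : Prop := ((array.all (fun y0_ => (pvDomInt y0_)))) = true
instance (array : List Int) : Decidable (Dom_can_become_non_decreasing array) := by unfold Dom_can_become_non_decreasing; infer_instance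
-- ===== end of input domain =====

-- B replaces A's count-all-violations-then-bridge-check pass by a single-pass greedy
-- repair carrying only the two effective previous elements (objective: alternative).

-- ===== PORT A =====
-- the for-loop over range(len(array)-1), with state (violations, violation_idx);
-- `none` models the early `return False`
def canLoopA (array : List Int) : List Int → Int → Int → Option (Int × Int)
  | [], v, vi => some (v, vi)
  | i :: is, v, vi =>
    if PySem.List.pyGetD array i 0 > PySem.List.pyGetD array (i + 1) 0 then
      if v + 1 > 1 then none
      else canLoopA array is (v + 1) i
    else canLoopA array is v vi

def can_become_non_decreasing (array : List Int) : Bool :=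
  if array.length ≤ 2 then true
  else
    match canLoopA array (PySem.List.pyRange 0 ((array.length : Int) - 1) 1) 0 (-1) with
    | none => false
    | some (violations, violation_idx) =>
      if violations = 0 then true
      else
        let i := violation_idx
        let option_a := decide (i = 0) ||
          decide (PySem.List.pyGetD array (i - 1) 0 ≤ PySem.List.pyGetD array (i + 1) 0)
        let option_b := decide (i + 1 = (array.length : Int) - 1) ||
          decide (PySem.List.pyGetD array i 0 ≤ PySem.List.pyGetD array (i + 2) 0)
        option_a || option_b

-- ===== PORT B =====
-- the for-loop over array[1:] with state (pp, p, used); `pp` is the effective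
-- element two back (none before index 1), `p` the effective previous element
def canGoB : Option Int → Int → List Int → Bool → Bool
  | _, _, [], _ => true
  | pp, p, x :: xs, used =>
    if p ≤ x then canGoB (some p) x xs used
    else if used then false
    else if pp.elim true (fun q => decide (q ≤ x)) then canGoB (some p) x xs true
    else canGoB (some p) p xs true

def can_become_non_decreasing_alt (array : List Int) : Bool :=
  match array with
  | [] => true
  | a :: rest => canGoB none a rest false

-- ===== PRECONDITION & SPEC =====
def Spec_can_become_non_decreasing (array : List Int) (out : Bool) : Prop := out = can_become_non_decreasing_alt array
instance (array : List Int) (out : Bool) : Decidable (Spec_can_become_non_decreasing array out) := by unfold Spec_can_become_non_decreasing; infer_instance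

-- ===== CLAIM (what is proved, stated in full; the proofs are below) =====
def Claim_equal_can_become_non_decreasing : Prop := ∀ (array : List Int), Dom_can_become_non_decreasing array → Spec_can_become_non_decreasing array (can_become_non_decreasing array)

-- ===== LEMMAS AND PROOFS =====

-- Bool test for "non-decreasing"
def srt : List Int → Bool
  | x :: y :: t => decide (x ≤ y) && srt (y :: t)
  | _ => true

-- A's post-processing after the counting loop, as a standalone function
def postA (array : List Int) : Option (Int × Int) → Bool
  | none => false
  | some (v, vi) =>
    if v = 0 then true
    else
      (decide (vi = 0) ||
        decide (PySem.List.pyGetD array (vi - 1) 0 ≤ PySem.List.pyGetD array (vi + 1) 0)) ||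
      (decide (vi + 1 = (array.length : Int) - 1) ||
        decide (PySem.List.pyGetD array vi 0 ≤ PySem.List.pyGetD array (vi + 2) 0))

@[simp] lemma canLoopA_nil (a : List Int) (v vi : Int) : canLoopA a [] v vi = some (v, vi) := rfl

@[simp] lemma canLoopA_cons (a : List Int) (i : Int) (is : List Int) (v vi : Int) :
    canLoopA a (i :: is) v vi =
      (if PySem.List.pyGetD a i 0 > PySem.List.pyGetD a (i + 1) 0 then
        if v + 1 > 1 then none else canLoopA a is (v + 1) i
      else canLoopA a is v vi) := rfl

@[simp] lemma canGoB_nil (pp : Option Int) (p : Int) (u : Bool) : canGoB pp p [] u = true := rfl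

@[simp] lemma canGoB_cons (pp : Option Int) (p x : Int) (xs : List Int) (u : Bool) :
    canGoB pp p (x :: xs) u =
      (if p ≤ x then canGoB (some p) x xs u
      else if u then false
      else if pp.elim true (fun q => decide (q ≤ x)) then canGoB (some p) x xs true
      else canGoB (some p) p xs true) := rfl

lemma getD_mid (pre l : List Int) (p : Int) (i : Int) (h : i = pre.length) :
    PySem.List.pyGetD (pre ++ p :: l) i 0 = p := by
  subst h
  rw [PySem.List.pyGetD_natCast]
  simp [List.getD]

lemma canGoB_used (l : List Int) : ∀ (pp : Option Int) (p : Int),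
    canGoB pp p l true = srt (p :: l) := by
  induction l with
  | nil => intro pp p; simp [canGoB, srt]
  | cons x xs ih =>
    intro pp p
    by_cases h : p ≤ x
    · simp [canGoB, srt, h, ih]
    · simp [canGoB, srt, h]

lemma loopA_one (l : List Int) : ∀ (pre : List Int) (p vi lo hi : Int),
    lo = pre.length → hi = pre.length + l.length →
    canLoopA (pre ++ p :: l) (PySem.List.pyRange lo hi 1) 1 vi
      = if srt (p :: l) then some (1, vi) else none := by
  induction l with
  | nil =>
    intro pre p vi lo hi hlo hhi
    simp at hhi
    rw [PySem.List.pyRange_one_eq_nil (by omega)]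
    simp [srt]
  | cons x xs ih =>
    intro pre p vi lo hi hlo hhi
    simp at hhi
    rw [PySem.List.pyRange_one_cons (by omega)]
    have h1 : PySem.List.pyGetD (pre ++ p :: x :: xs) lo 0 = p := getD_mid pre _ p lo hlo
    have h2 : PySem.List.pyGetD (pre ++ p :: x :: xs) (lo + 1) 0 = x := by
      have hsplit : pre ++ p :: x :: xs = (pre ++ [p]) ++ x :: xs := by simp
      rw [hsplit, getD_mid (pre ++ [p]) _ x (lo + 1) (by simp; omega)]
    have hstep := ih (pre ++ [p]) x vi (lo + 1) hi (by simp; omega) (by simp; omega)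
    rw [show (pre ++ [p]) ++ x :: xs = pre ++ p :: x :: xs by simp] at hstep
    by_cases hpx : p > x
    · rw [canLoopA_cons, h1, h2, if_pos hpx, if_pos (by omega)]
      have hf : srt (p :: x :: xs) = false := by
        simp only [srt, Bool.and_eq_false_iff, decide_eq_false_iff_not]
        left; omega
      rw [hf]
      simp
    · rw [canLoopA_cons, h1, h2, if_neg hpx, hstep]
      simp [srt, (by omega : p ≤ x)]

lemma mainLemma (l : List Int) : ∀ (pre : List Int) (p lo hi : Int),
    lo = pre.length → hi = pre.length + l.length →
    postA (pre ++ p :: l) (canLoopA (pre ++ p :: l) (PySem.List.pyRange lo hi 1) 0 (-1))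
      = canGoB pre.getLast? p l false := by
  induction l with
  | nil =>
    intro pre p lo hi hlo hhi
    simp at hhi
    rw [PySem.List.pyRange_one_eq_nil (by omega)]
    simp [postA]
  | cons x xs ih =>
    intro pre p lo hi hlo hhi
    simp at hhi
    rw [PySem.List.pyRange_one_cons (by omega)]
    have h1 : PySem.List.pyGetD (pre ++ p :: x :: xs) lo 0 = p := getD_mid pre _ p lo hlo
    have h2 : PySem.List.pyGetD (pre ++ p :: x :: xs) (lo + 1) 0 = x := by
      have hsplit : pre ++ p :: x :: xs = (pre ++ [p]) ++ x :: xs := by simp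
      rw [hsplit, getD_mid (pre ++ [p]) _ x (lo + 1) (by simp; omega)]
    by_cases hpx : p ≤ x
    · -- no violation here: step both loops
      have hstep := ih (pre ++ [p]) x (lo + 1) hi (by simp; omega) (by simp; omega)
      rw [show (pre ++ [p]) ++ x :: xs = pre ++ p :: x :: xs by simp] at hstep
      rw [canLoopA_cons, h1, h2, if_neg (by omega : ¬ p > x), hstep]
      simp [hpx]
    · -- first violation, at index lo = pre.length
      have hone := loopA_one xs (pre ++ [p]) x lo (lo + 1) hi (by simp; omega) (by simp; omega)
      rw [show (pre ++ [p]) ++ x :: xs = pre ++ p :: x :: xs by simp] at hone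
      rw [canLoopA_cons, h1, h2, if_pos (by omega : p > x), if_neg (by omega)]
      rw [canGoB_cons, if_neg hpx, if_neg (by simp)]
      rw [show ((0:Int) + 1) = 1 by norm_num, hone]
      rw [canGoB_used, canGoB_used]
      rcases hgl : pre.getLast? with _ | q
      · -- pre = [], i.e. lo = 0 : option_a short-circuits
        rw [List.getLast?_eq_none_iff] at hgl
        subst hgl
        have hlo0 : lo = 0 := by simpa using hlo
        subst hlo0
        simp only [Option.elim_none]
        by_cases hs : srt (x :: xs) = true
        · rw [if_pos hs, hs]; simp [postA]
        · rw [if_neg (by simp [hs]), Bool.eq_false_iff.mpr hs]; simp [postA]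
      · -- pre ends in q
        obtain ⟨pre2, hpre⟩ := List.getLast?_eq_some_iff.mp hgl
        subst hpre
        have hq : ((pre2 ++ [q]) ++ p :: x :: xs : List Int) = pre2 ++ q :: p :: x :: xs := by simp
        rw [hq] at h1 h2 ⊢
        have hqm1 : PySem.List.pyGetD (pre2 ++ q :: p :: x :: xs) (lo - 1) 0 = q :=
          getD_mid pre2 _ q (lo - 1) (by simp at hlo ⊢; omega)
        have hlo0 : ¬ (lo = 0) := by simp at hlo; omega
        simp only [Option.elim_some]
        by_cases hs : srt (x :: xs) = true
        · rw [if_pos hs]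
          by_cases hqx : q ≤ x
          · rw [if_pos (by simpa using hqx), hs]
            simp [postA, hqm1, h2, hqx]
          · rw [if_neg (by simpa using hqx)]
            cases xs with
            | nil =>
              have hb : lo + 1 = ((pre2 ++ q :: p :: x :: ([] : List Int)).length : Int) - 1 := by
                simp at hlo ⊢; omega
              simp [postA, srt, hb]
            | cons y ys =>
              simp only [srt, Bool.and_eq_true, decide_eq_true_eq] at hs
              have h3 : PySem.List.pyGetD (pre2 ++ q :: p :: x :: y :: ys) (lo + 2) 0 = y := by
                rw [show pre2 ++ q :: p :: x :: y :: ys = (pre2 ++ [q, p, x]) ++ y :: ys by simp]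
                exact getD_mid _ _ y (lo + 2) (by simp at hlo ⊢; omega)
              have hnb : ¬ (lo + 1 = ((pre2 ++ q :: p :: x :: y :: ys).length : Int) - 1) := by
                simp at hlo ⊢; omega
              have hlo' : lo = (pre2.length : Int) + 1 := by simp at hlo; omega
              by_cases hpy : p ≤ y
              · simp [postA, srt, hlo0, hqm1, h2, h1, h3, hqx, hs.2, hpy]
              · simp [postA, srt, hlo0, hqm1, h2, h1, h3, hqx, hs.2, hpy]
                omega
        · rw [if_neg (by simp [hs])]
          by_cases hqx : q ≤ x
          · rw [if_pos (by simpa using hqx), Bool.eq_false_iff.mpr hs]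
            simp [postA]
          · rw [if_neg (by simpa using hqx)]
            cases xs with
            | nil => simp [srt] at hs
            | cons y ys =>
              simp only [srt, Bool.and_eq_true, decide_eq_true_eq] at hs
              by_cases hpy : p ≤ y
              · have hxy : x ≤ y := by omega
                have hs2 : ¬ srt (y :: ys) = true := fun h => hs ⟨hxy, h⟩
                simp [postA, srt, hpy, Bool.eq_false_iff.mpr hs2]
              · simp [postA, srt, hpy]

-- ===== VERDICT (by name: the statement is the Claim_ definition above) =====
theorem can_become_non_decreasing_spec : Claim_equal_can_become_non_decreasing := by
  intro array _hdom
  show can_become_non_decreasing array = can_become_non_decreasing_alt array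
  match array with
  | [] => rfl
  | [a] => rfl
  | [a, b] =>
    by_cases h : a ≤ b <;>
      simp [can_become_non_decreasing, can_become_non_decreasing_alt, canGoB_cons, h]
  | a :: b :: c :: t =>
    have h := mainLemma (b :: c :: t) [] a 0 (((a :: b :: c :: t).length : Int) - 1)
      (by simp) (by simp; try omega)
    simp only [List.nil_append, List.getLast?_nil] at h
    rw [show can_become_non_decreasing_alt (a :: b :: c :: t)
        = canGoB none a (b :: c :: t) false from rfl]
    unfold can_become_non_decreasing
    rw [if_neg (by simp)]
    rw [← h]
    generalize canLoopA (a :: b :: c :: t)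
      (PySem.List.pyRange 0 (((a :: b :: c :: t).length : Int) - 1) 1) 0 (-1) = r
    rcases r with _ | ⟨v, vi⟩ <;> rfl
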